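-- pv_equiv track=rewrite | github.com/Pioreactor/pioreactor | pioreactor/utils/__init__.py | argextrema
-- ===== SOURCE A (Python) =====
-- from typing import Sequence
--
-- def argextrema(x: Sequence) -> tuple[int, int]:
--     if len(x) == 0:
--         raise ValueError("argextrema() arg is an empty sequence")
--
--     min_, max_ = float("inf"), float("-inf")
--     argmin_, argmax_ = 0, 0
--     for i, value in enumerate(x):
--         if value < min_:
--             min_ = value
--             argmin_ = i
--         if value > max_:
--             max_ = value
--             argmax_ = i
--     return argmin_, argmax_
-- ===== SOURCE B (Python) =====
-- def argextrema(x):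
--     if len(x) == 0:
--         raise ValueError("argextrema() arg is an empty sequence")
--     return (min(range(len(x)), key=x.__getitem__),
--             max(range(len(x)), key=x.__getitem__))
-- ===== Notes on version B (the rewrite author's own statement) =====
-- stated objective: idiomatic
-- what changed: Replaces A's single fused scan with explicit inf/-inf sentinels and manual index bookkeeping by two independent built-in min/max passes over the index range keyed by x.__getitem__ (same first-occurrence tie-break).
import Mathlib
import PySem

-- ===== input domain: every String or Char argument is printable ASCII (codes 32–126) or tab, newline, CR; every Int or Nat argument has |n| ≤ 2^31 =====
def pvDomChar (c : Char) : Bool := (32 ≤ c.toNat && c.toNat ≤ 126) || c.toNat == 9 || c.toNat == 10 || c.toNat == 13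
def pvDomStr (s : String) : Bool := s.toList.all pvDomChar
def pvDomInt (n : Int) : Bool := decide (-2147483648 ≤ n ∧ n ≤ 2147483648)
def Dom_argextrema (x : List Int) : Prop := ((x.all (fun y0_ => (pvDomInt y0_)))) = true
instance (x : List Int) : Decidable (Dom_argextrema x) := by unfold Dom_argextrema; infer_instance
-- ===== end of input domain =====

-- B changes A's fused single scan (inf/-inf sentinels, manual index bookkeeping) into two
-- independent built-in min/max passes over the index range keyed by the element at each index.
-- A raises ValueError on the empty list (and so does B): excluded by Pre_.

-- ===== PORT A =====
-- the loop body of A: state is (min_, max_, argmin_, argmax_), with none playing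
-- float('inf') / float('-inf') (every Int compares below/above the absent sentinel)
def argextremaLoop (st : Option Int × Option Int × Int × Int) (p : Int × Int) :
    Option Int × Option Int × Int × Int :=
  match st, p with
  | (mn, mx, am, aM), (i, v) =>
    let hitMin : Bool := match mn with | none => true | some m => decide (v < m)
    let (mn', am') := if hitMin then ((some v : Option Int), i) else (mn, am)
    let hitMax : Bool := match mx with | none => true | some M => decide (M < v)
    let (mx', aM') := if hitMax then ((some v : Option Int), i) else (mx, aM)
    (mn', mx', am', aM')

def argextrema (x : List Int) : Int × Int :=
  let r := (PySem.List.enumerate x 0).foldl argextremaLoop (none, none, 0, 0)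
  (r.2.2.1, r.2.2.2)

-- ===== PORT B =====
def argextrema_alt (x : List Int) : Int × Int :=
  let key := fun (i : Int) => PySem.List.pyGetD x i 0   -- x.__getitem__ (in-range on range(len(x)))
  ((PySem.List.min? (PySem.List.pyRange 0 (PySem.List.len x) 1) key).getD 0,
   (PySem.List.max? (PySem.List.pyRange 0 (PySem.List.len x) 1) key).getD 0)

-- ===== PRECONDITION & SPEC =====
-- the Python A raises ValueError on the empty sequence (B raises too)
def Pre_argextrema (x : List Int) : Prop := x ≠ []
instance (x : List Int) : Decidable (Pre_argextrema x) := by unfold Pre_argextrema; infer_instance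
def pvWitness_argextrema : List Int := [3, -1, 4, -1, 5]

def Spec_argextrema (x : List Int) (out : Int × Int) : Prop := out = argextrema_alt x
instance (x : List Int) (out : Int × Int) : Decidable (Spec_argextrema x out) := by unfold Spec_argextrema; infer_instance

-- ===== CLAIM (what is proved, stated in full; the proofs are below) =====
def Claim_equal_argextrema : Prop := ∀ (x : List Int), Dom_argextrema x → Pre_argextrema x → Spec_argextrema x (argextrema x)

-- ===== LEMMAS AND PROOFS =====

-- B's min?/max? step functions (exactly what PySem.List.min?/max? fold with)
def pvMinStep (key : Int → Int) (acc : Option Int) (j : Int) : Option Int :=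
  match acc with
  | none => some j
  | some m => if key j < key m then some j else some m

def pvMaxStep (key : Int → Int) (acc : Option Int) (j : Int) : Option Int :=
  match acc with
  | none => some j
  | some m => if key m < key j then some j else some m

-- link between A's (value-sentinel, arg) pair and B's index accumulator
def RelMin (key : Int → Int) (mn : Option Int) (am : Int) (acc : Option Int) : Prop :=
  (mn = none ∧ acc = none ∧ am = 0) ∨ (∃ j, acc = some j ∧ mn = some (key j) ∧ am = j)

def RelMax (key : Int → Int) (mx : Option Int) (aM : Int) (acc : Option Int) : Prop :=
  (mx = none ∧ acc = none ∧ aM = 0) ∨ (∃ j, acc = some j ∧ mx = some (key j) ∧ aM = j)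

theorem relMin_step (key : Int → Int) (mn : Option Int) (am : Int) (acc : Option Int) (j : Int)
    (h : RelMin key mn am acc) :
    RelMin key
      (if (match mn with | none => true | some m => decide (key j < m)) then some (key j) else mn)
      (if (match mn with | none => true | some m => decide (key j < m)) then j else am)
      (pvMinStep key acc j) := by
  rcases h with ⟨h1, h2, h3⟩ | ⟨j0, h1, h2, h3⟩
  · subst h1; subst h2; subst h3
    right; exact ⟨j, rfl, rfl, rfl⟩
  · rw [h1, h2, h3]
    simp only [pvMinStep]
    by_cases hlt : key j < key j0
    · right; refine ⟨j, ?_, ?_, ?_⟩ <;> simp [hlt]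
    · right; refine ⟨j0, ?_, ?_, ?_⟩ <;> simp [hlt]

theorem relMax_step (key : Int → Int) (mx : Option Int) (aM : Int) (acc : Option Int) (j : Int)
    (h : RelMax key mx aM acc) :
    RelMax key
      (if (match mx with | none => true | some M => decide (M < key j)) then some (key j) else mx)
      (if (match mx with | none => true | some M => decide (M < key j)) then j else aM)
      (pvMaxStep key acc j) := by
  rcases h with ⟨h1, h2, h3⟩ | ⟨j0, h1, h2, h3⟩
  · subst h1; subst h2; subst h3
    right; exact ⟨j, rfl, rfl, rfl⟩
  · rw [h1, h2, h3]
    simp only [pvMaxStep]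
    by_cases hlt : key j0 < key j
    · right; refine ⟨j, ?_, ?_, ?_⟩ <;> simp [hlt]
    · right; refine ⟨j0, ?_, ?_, ?_⟩ <;> simp [hlt]

theorem fold_link (key : Int → Int) (l : List Int) :
    ∀ (mn mx : Option Int) (am aM : Int) (accMin accMax : Option Int),
      RelMin key mn am accMin → RelMax key mx aM accMax →
      RelMin key (l.foldl (fun st j => argextremaLoop st (j, key j)) (mn, mx, am, aM)).1
        (l.foldl (fun st j => argextremaLoop st (j, key j)) (mn, mx, am, aM)).2.2.1
        (l.foldl (pvMinStep key) accMin) ∧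
      RelMax key (l.foldl (fun st j => argextremaLoop st (j, key j)) (mn, mx, am, aM)).2.1
        (l.foldl (fun st j => argextremaLoop st (j, key j)) (mn, mx, am, aM)).2.2.2
        (l.foldl (pvMaxStep key) accMax) := by
  induction l with
  | nil => intro mn mx am aM accMin accMax h1 h2; exact ⟨h1, h2⟩
  | cons j t ih =>
    intro mn mx am aM accMin accMax h1 h2
    simp only [List.foldl_cons]
    have h1' := relMin_step key mn am accMin j h1
    have h2' := relMax_step key mx aM accMax j h2
    -- one step of argextremaLoop equals the two guarded updates
    have hstep : argextremaLoop (mn, mx, am, aM) (j, key j) =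
        ((if (match mn with | none => true | some m => decide (key j < m)) then some (key j) else mn),
         (if (match mx with | none => true | some M => decide (M < key j)) then some (key j) else mx),
         (if (match mn with | none => true | some m => decide (key j < m)) then j else am),
         (if (match mx with | none => true | some M => decide (M < key j)) then j else aM)) := by
      simp only [argextremaLoop]
      cases mn <;> cases mx <;> simp <;> split_ifs <;> simp
    rw [hstep]
    exact ih _ _ _ _ _ _ h1' h2'

-- ===== VERDICT (by name: the statement is the Claim_ definition above) =====
theorem argextrema_spec : Claim_equal_argextrema := by
  intro x _ _
  unfold Spec_argextrema argextrema argextrema_alt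
  have he : PySem.List.enumerate x 0 =
      (PySem.List.pyRange 0 (PySem.List.len x) 1).map
        (fun j => (j, PySem.List.pyGetD x j 0)) :=
    PySem.List.enumerate_eq_map_pyRange x 0
  rw [he, List.foldl_map]
  set key := fun (i : Int) => PySem.List.pyGetD x i 0 with hkey
  have hlink := fold_link key (PySem.List.pyRange 0 (PySem.List.len x) 1)
    none none 0 0 none none (Or.inl ⟨rfl, rfl, rfl⟩) (Or.inl ⟨rfl, rfl, rfl⟩)
  have hmin : PySem.List.min? (PySem.List.pyRange 0 (PySem.List.len x) 1) key =
      (PySem.List.pyRange 0 (PySem.List.len x) 1).foldl (pvMinStep key) none := by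
    simp only [PySem.List.min?]; congr 1; funext a j; cases a <;> rfl
  have hmax : PySem.List.max? (PySem.List.pyRange 0 (PySem.List.len x) 1) key =
      (PySem.List.pyRange 0 (PySem.List.len x) 1).foldl (pvMaxStep key) none := by
    simp only [PySem.List.max?]; congr 1; funext a j; cases a <;> rfl
  rcases hlink with ⟨hm, hM⟩
  refine Prod.ext ?_ ?_
  · show _ = (PySem.List.min? (PySem.List.pyRange 0 (PySem.List.len x) 1) key).getD 0
    rw [hmin]
    rcases hm with ⟨_, hacc, ham⟩ | ⟨j, hacc, _, ham⟩ <;> rw [ham, hacc] <;> rfl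
  · show _ = (PySem.List.max? (PySem.List.pyRange 0 (PySem.List.len x) 1) key).getD 0
    rw [hmax]
    rcases hM with ⟨_, hacc, haM⟩ | ⟨j, hacc, _, haM⟩ <;> rw [haM, hacc] <;> rfl
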